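-- pv_equiv track=rewrite | github.com/esuarkb/mypinkassistant | newcustomer.py | format_street
-- ===== SOURCE A (Python) =====
-- def format_street(street: str) -> str:
--     """
--     Light normalization so '555 5th st' -> '555 5th St'
--     (Does not try to be perfect USPS formatting.)
--     """
--     s = (street or "").strip()
--     if not s:
--         return ""
--
--     repl = {
--         " st": " St",
--         " rd": " Rd",
--         " ave": " Ave",
--         " blvd": " Blvd",
--         " dr": " Dr",
--         " ln": " Ln",
--         " ct": " Ct",
--         " cir": " Cir",
--         " pkwy": " Pkwy",
--         " hwy": " Hwy",
--         " pl": " Pl",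
--         " ter": " Ter",
--         " way": " Way",
--         " trl": " Trl",
--     }
--
--     low = s.lower()
--     for k, v in repl.items():
--         if low.endswith(k):
--             # replace only the ending token
--             s = s[:-len(k)] + v
--             return s
--
--     # If they typed the whole thing lowercase, title-case words, but preserve numbers.
--     # This is intentionally conservative.
--     if s == low:
--         s = " ".join([w if any(ch.isdigit() for ch in w) else w.capitalize() for w in s.split()])
--     return s
-- ===== SOURCE B (Python) =====
-- _SUFFIXES = {"st", "rd", "ave", "blvd", "dr", "ln", "ct", "cir",
--              "pkwy", "hwy", "pl", "ter", "way", "trl"}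
--
--
-- def _fix(w: str) -> str:
--     return w if any(ch.isdigit() for ch in w) else w.capitalize()
--
--
-- def format_street(street: str) -> str:
--     """
--     Light normalization so '555 5th st' -> '555 5th St'
--     (Does not try to be perfect USPS formatting.)
--     """
--     s = (street or "").strip()
--     if not s:
--         return ""
--
--     # Split off the token after the LAST space; every replacement value in the
--     # original table is just key.capitalize(), so one set-membership test plus
--     # capitalize() replaces the fourteen-candidate endswith scan.
--     head, sep, last = s.rpartition(' ')
--     low_last = last.lower()
--     if sep and low_last in _SUFFIXES:
--         return head + ' ' + low_last.capitalize()
--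
--     if s != s.lower():
--         return s
--     return " ".join(_fix(w) for w in s.split())
-- ===== Notes on version B (the rewrite author's own statement) =====
-- stated objective: simpler
-- what changed: Replaces the fourteen-candidate endswith scan over a dict of space-prefixed replacement strings by an rpartition split of the final space-separated token, one set-membership test on its bare lowercased form, and capitalize() to produce the replacement (every value of A's table is just its key capitalized); the digit-preserving title-case is factored into a named helper.
import Mathlib
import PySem

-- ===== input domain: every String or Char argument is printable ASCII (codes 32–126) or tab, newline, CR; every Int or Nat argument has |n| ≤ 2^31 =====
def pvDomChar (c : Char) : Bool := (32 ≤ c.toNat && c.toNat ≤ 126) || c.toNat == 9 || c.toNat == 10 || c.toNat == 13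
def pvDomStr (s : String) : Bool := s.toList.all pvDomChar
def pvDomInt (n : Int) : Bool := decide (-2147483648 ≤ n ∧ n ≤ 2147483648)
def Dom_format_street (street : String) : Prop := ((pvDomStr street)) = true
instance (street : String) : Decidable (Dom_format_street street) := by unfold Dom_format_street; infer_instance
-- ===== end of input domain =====

-- B replaces A's fourteen-candidate endswith scan over a dict of space-prefixed replacement
-- strings by an rpartition split of the final space-separated token, one set-membership test
-- on its bare lowercased form, and capitalize() to rebuild the replacement (objective: simpler).

-- ===== PORT A =====

-- the `repl` dict literal of A (keys carry the leading space, as in the source)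
def pvReplA : PySem.Dict (List Char) (List Char) :=
  ⟨[(" st".toList, " St".toList), (" rd".toList, " Rd".toList), (" ave".toList, " Ave".toList),
    (" blvd".toList, " Blvd".toList), (" dr".toList, " Dr".toList), (" ln".toList, " Ln".toList),
    (" ct".toList, " Ct".toList), (" cir".toList, " Cir".toList), (" pkwy".toList, " Pkwy".toList),
    (" hwy".toList, " Hwy".toList), (" pl".toList, " Pl".toList), (" ter".toList, " Ter".toList),
    (" way".toList, " Way".toList), (" trl".toList, " Trl".toList)]⟩

-- w.capitalize() (first char upper, rest lower)
def pvCapitalize (w : List Char) : List Char :=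
  match w with
  | [] => []
  | c :: rest => PySem.Chars.upperChar c :: PySem.Chars.lower rest

-- `for k, v in repl.items(): if low.endswith(k): return s[:-len(k)] + v`; none = fell through
def pvLoopA (s low : List Char) : List (List Char × List Char) → Option (List Char)
  | [] => none
  | (k, v) :: rest =>
    if PySem.Chars.endswith low k then
      some (PySem.Chars.slice s none (some (-(k.length : Int))) ++ v)
    else pvLoopA s low rest

def pvFmtA (street : List Char) : List Char :=
  let s := PySem.Chars.strip (if street = [] then [] else street)  -- (street or "").strip()
  if s = [] then []
  else
    let low := PySem.Chars.lower s
    match pvLoopA s low pvReplA.items with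
    | some r => r
    | none =>
      if s = low then
        PySem.Chars.join [' ']
          ((PySem.Chars.split₀ s).map (fun w =>
            if w.any PySem.Chars.isdigit then w else pvCapitalize w))
      else s

def format_street (street : String) : String := String.ofList (pvFmtA street.toList)

-- ===== PORT B =====

-- the `_SUFFIXES` set literal of B (bare lowercase keys)
def pvSuffixSet : PySem.Set (List Char) :=
  PySem.Set.ofList ["st".toList, "rd".toList, "ave".toList, "blvd".toList, "dr".toList,
    "ln".toList, "ct".toList, "cir".toList, "pkwy".toList, "hwy".toList, "pl".toList,
    "ter".toList, "way".toList, "trl".toList]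

-- the helper `_fix` of B
def pvFixWord (w : List Char) : List Char :=
  if w.any PySem.Chars.isdigit then w else pvCapitalize w

-- s.rpartition(' ') — hand port of the library call, exact for the single-char separator ' ':
-- the suffix of non-space characters is split off from the reversed string.
def pvRpartitionSpace (s : List Char) : List Char × List Char × List Char :=
  let r := s.reverse
  let lastR := r.takeWhile (fun c => c != ' ')
  if lastR.length = r.length then ([], [], s)
  else ((r.drop (lastR.length + 1)).reverse, [' '], lastR.reverse)

def pvFmtB (street : List Char) : List Char :=
  let s := PySem.Chars.strip (if street = [] then [] else street)  -- (street or "").strip()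
  if s = [] then []
  else
    match pvRpartitionSpace s with
    | (head, sep, last) =>
      let lowLast := PySem.Chars.lower last
      if sep ≠ [] ∧ PySem.Set.contains pvSuffixSet lowLast then
        head ++ [' '] ++ pvCapitalize lowLast
      else if ¬ (s = PySem.Chars.lower s) then s
      else PySem.Chars.join [' '] ((PySem.Chars.split₀ s).map pvFixWord)

def format_street_alt (street : String) : String := String.ofList (pvFmtB street.toList)

-- ===== PRECONDITION & SPEC =====
def Spec_format_street (street : String) (out : String) : Prop := out = format_street_alt street
instance (street : String) (out : String) : Decidable (Spec_format_street street out) := by unfold Spec_format_street; infer_instance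

-- ===== CLAIM (what is proved, stated in full; the proofs are below) =====
def Claim_equal_format_street : Prop := ∀ (street : String), Dom_format_street street → Spec_format_street street (format_street street)

-- ===== LEMMAS AND PROOFS =====

-- bare (key, value) pairs: A's dict is these with a space glued on both sides
def pvPairs : List (List Char × List Char) :=
  [("st".toList, "St".toList), ("rd".toList, "Rd".toList), ("ave".toList, "Ave".toList),
   ("blvd".toList, "Blvd".toList), ("dr".toList, "Dr".toList), ("ln".toList, "Ln".toList),
   ("ct".toList, "Ct".toList), ("cir".toList, "Cir".toList), ("pkwy".toList, "Pkwy".toList),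
   ("hwy".toList, "Hwy".toList), ("pl".toList, "Pl".toList), ("ter".toList, "Ter".toList),
   ("way".toList, "Way".toList), ("trl".toList, "Trl".toList)]

lemma pvReplA_items : pvReplA.items = pvPairs.map (fun p => (' ' :: p.1, ' ' :: p.2)) := by
  decide

lemma pvLowerChar_eq_space {c : Char} (h : PySem.Chars.lowerChar c = ' ') : c = ' ' := by
  unfold PySem.Chars.lowerChar at h
  split_ifs at h with hu
  · exfalso
    have h2 := congrArg Char.toNat h
    rw [Char.toNat_ofNat] at h2
    simp only [PySem.Chars.isupper, Bool.and_eq_true, decide_eq_true_eq] at hu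
    have h4 : 65 ≤ c.toNat := Nat.succ_le_of_lt hu.1
    have h5 : c.toNat ≤ 90 := Fin.mk_le_mk.mp hu.2
    have h3 : (' ').toNat = 32 := rfl
    rw [h3] at h2
    split_ifs at h2; omega
  · exact h

lemma pvMemLower {l : List Char} (h : ' ' ∈ PySem.Chars.lower l) : ' ' ∈ l := by
  simp only [PySem.Chars.lower, List.mem_map] at h
  obtain ⟨c, hc, he⟩ := h
  rwa [pvLowerChar_eq_space he] at hc

lemma pvLowerAppend (a b : List Char) :
    PySem.Chars.lower (a ++ b) = PySem.Chars.lower a ++ PySem.Chars.lower b := by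
  simp [PySem.Chars.lower]

lemma pvLowerConsSpace (b : List Char) :
    PySem.Chars.lower (' ' :: b) = ' ' :: PySem.Chars.lower b := by
  simp only [PySem.Chars.lower, List.map_cons]
  norm_num
  decide

lemma pvEndswithIff (P last tok : List Char) (hlastS : ' ' ∉ last)
    (htokS : ' ' ∉ tok) :
    ((' ' :: tok) <:+ PySem.Chars.lower (P ++ ' ' :: last)) ↔ PySem.Chars.lower last = tok := by
  rw [pvLowerAppend, pvLowerConsSpace]
  have hlowS : ' ' ∉ PySem.Chars.lower last := fun h => hlastS (pvMemLower h)
  constructor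
  · intro h
    have h2 : (' ' :: PySem.Chars.lower last) <:+
        (PySem.Chars.lower P ++ ' ' :: PySem.Chars.lower last) := List.suffix_append _ _
    rcases List.suffix_or_suffix_of_suffix h h2 with h3 | h3
    · rcases List.suffix_cons_iff.mp h3 with he | h4
      · rw [List.cons.injEq] at he; exact he.2.symm
      · exact absurd (h4.subset (List.mem_cons_self)) hlowS
    · rcases List.suffix_cons_iff.mp h3 with he | h4
      · rw [List.cons.injEq] at he; exact he.2
      · exact absurd (h4.subset (List.mem_cons_self)) htokS
  · intro h
    rw [h]
    exact List.suffix_append _ _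

lemma pvSliceNegTail (P last : List Char) (n : Nat) (hn : n = last.length) :
    PySem.Chars.slice (P ++ ' ' :: last) none (some (-((n + 1 : Nat) : Int))) = P := by
  subst hn
  simp only [PySem.Chars.slice_eq_listSlice, PySem.List.slice, PySem.List.clampIdx]
  have hlen : (P ++ ' ' :: last).length = P.length + last.length + 1 := by
    simp; omega
  rw [hlen]
  have h1 : (-((last.length + 1 : Nat) : Int)) < 0 := by push_cast; omega
  rw [if_pos h1]
  have h2 : ¬ ((P.length + last.length + 1 : Nat) : Int) + -((last.length + 1 : Nat) : Int) < 0 := by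
    push_cast; omega
  rw [if_neg h2]
  have h3 : (((P.length + last.length + 1 : Nat) : Int) + -((last.length + 1 : Nat) : Int)).toNat
      = P.length := by push_cast; omega
  rw [h3]
  simp

lemma pvLoopEqFind (P last : List Char) (hlastS : ' ' ∉ last)
    (pairs : List (List Char × List Char)) (hk : ∀ p ∈ pairs, p.1 ≠ [] ∧ ' ' ∉ p.1) :
    pvLoopA (P ++ ' ' :: last) (PySem.Chars.lower (P ++ ' ' :: last))
        (pairs.map (fun p => (' ' :: p.1, ' ' :: p.2)))
      = Option.map (fun pr => (P ++ [' ']) ++ pr.2)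
          (List.find? (fun p => p.1 == PySem.Chars.lower last) pairs) := by
  induction pairs with
  | nil => simp [pvLoopA]
  | cons p rest ih =>
    obtain ⟨k, v⟩ := p
    obtain ⟨-, hkS⟩ := hk ⟨k, v⟩ List.mem_cons_self
    have hIff := pvEndswithIff P last k hlastS hkS
    simp only [List.map_cons, pvLoopA, List.find?]
    by_cases heq : PySem.Chars.lower last = k
    · have hew : PySem.Chars.endswith (PySem.Chars.lower (P ++ ' ' :: last)) (' ' :: k) = true := by
        rw [PySem.Chars.endswith_iff]; exact hIff.mpr heq
      have hb : (k == PySem.Chars.lower last) = true := by simp [heq]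
      rw [hew, hb]
      have hsl : PySem.Chars.slice (P ++ ' ' :: last) none (some (-(((' ' :: k).length : Nat) : Int))) = P := by
        have hlen2 : (' ' :: k).length = last.length + 1 := by simp [← heq, PySem.Chars.lower]
        rw [hlen2]
        exact pvSliceNegTail P last last.length rfl
      simp only [hsl, Option.map_some]
      simp [List.append_assoc]
    · have hew : PySem.Chars.endswith (PySem.Chars.lower (P ++ ' ' :: last)) (' ' :: k) = false := by
        rw [Bool.eq_false_iff, ne_eq, PySem.Chars.endswith_iff]
        exact fun h => heq (hIff.mp h)
      have hb : (k == PySem.Chars.lower last) = false := by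
        simp [beq_eq_false_iff_ne]; exact fun h => heq h.symm
      rw [hew, hb]
      simp only [Bool.false_eq_true, if_false]
      exact ih (fun q hq => hk q (List.mem_cons_of_mem _ hq))

lemma pvLoopNone (s low : List Char) (hs : ' ' ∉ low)
    (pairs : List (List Char × List Char)) :
    pvLoopA s low (pairs.map (fun p => (' ' :: p.1, ' ' :: p.2))) = none := by
  induction pairs with
  | nil => simp [pvLoopA]
  | cons p rest ih =>
    obtain ⟨k, v⟩ := p
    have hew : PySem.Chars.endswith low (' ' :: k) = false := by
      rw [Bool.eq_false_iff, ne_eq, PySem.Chars.endswith_iff]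
      exact fun h => hs (h.subset List.mem_cons_self)
    simp only [List.map_cons, pvLoopA, hew, Bool.false_eq_true, if_false]
    exact ih

lemma pvKeysEq : pvPairs.map Prod.fst =
    ["st".toList, "rd".toList, "ave".toList, "blvd".toList, "dr".toList,
     "ln".toList, "ct".toList, "cir".toList, "pkwy".toList, "hwy".toList, "pl".toList,
     "ter".toList, "way".toList, "trl".toList] := by decide

lemma pvContainsIff (x : List Char) :
    PySem.Set.contains pvSuffixSet x = true ↔ ∃ p ∈ pvPairs, p.1 = x := by
  rw [PySem.Set.contains_iff]
  unfold pvSuffixSet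
  rw [PySem.Set.mem_ofList, ← pvKeysEq, List.mem_map]

lemma pvRpartition_eq (s : List Char) : pvRpartitionSpace s =
    (if (s.reverse.takeWhile (fun c => c != ' ')).length = s.reverse.length then
       (([] : List Char), ([] : List Char), s)
     else ((s.reverse.drop ((s.reverse.takeWhile (fun c => c != ' ')).length + 1)).reverse,
           [' '], (s.reverse.takeWhile (fun c => c != ' ')).reverse)) := rfl

lemma pvMain (l : List Char) (s : List Char) :
    (match pvLoopA s (PySem.Chars.lower s) (pvPairs.map (fun p => (' ' :: p.1, ' ' :: p.2))) with
     | some r => r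
     | none => if s = PySem.Chars.lower s then l else s)
    = (match pvRpartitionSpace s with
       | (head, sep, last) =>
         let lowLast := PySem.Chars.lower last
         if sep ≠ [] ∧ PySem.Set.contains pvSuffixSet lowLast then
           head ++ [' '] ++ pvCapitalize lowLast
         else if ¬ (s = PySem.Chars.lower s) then s
         else l) := by
  by_cases hsp : ' ' ∈ s
  · -- a space exists: decompose s at the LAST space
    have hspr : ' ' ∈ s.reverse := List.mem_reverse.mpr hsp
    have hsplit := List.takeWhile_append_dropWhile (p := fun c => c != ' ') (l := s.reverse)
    have hdne : s.reverse.dropWhile (fun c => c != ' ') ≠ [] := by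
      rw [ne_eq, List.dropWhile_eq_nil_iff]
      intro hall
      exact absurd (hall ' ' hspr) (by simp)
    obtain ⟨c, rest, hcr⟩ := List.exists_cons_of_ne_nil hdne
    have hc' : c = ' ' := by
      have h2 := List.head?_dropWhile_not (fun c => c != ' ') s.reverse
      rw [hcr] at h2
      simpa using h2
    subst hc'
    have hlastS : ' ' ∉ (s.reverse.takeWhile (fun c => c != ' ')).reverse := by
      rw [List.mem_reverse]
      intro hm
      have := List.mem_takeWhile_imp hm
      simp at this
    have hreq : s.reverse = s.reverse.takeWhile (fun c => c != ' ') ++ ' ' :: rest := by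
      conv_lhs => rw [← hsplit]
      rw [hcr]
    generalize hT : s.reverse.takeWhile (fun c => c != ' ') = T at hreq hlastS
    have hsdec : s = rest.reverse ++ ' ' :: T.reverse := by
      calc s = s.reverse.reverse := (List.reverse_reverse s).symm
        _ = (T ++ ' ' :: rest).reverse := by rw [hreq]
        _ = rest.reverse ++ ' ' :: T.reverse := by simp
    have hlen : ¬ T.length = s.reverse.length := by
      have := congrArg List.length hreq
      simp only [List.length_append, List.length_cons] at this
      omega
    have hdrop : s.reverse.drop (T.length + 1) = rest := by
      conv_lhs => rw [hreq]
      rw [List.drop_append]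
      simp
    have hrp : pvRpartitionSpace s = (rest.reverse, [' '], T.reverse) := by
      rw [pvRpartition_eq s, hT, if_neg hlen, hdrop]
    rw [hrp]
    -- A's loop is a find? over the bare pairs
    have hA : pvLoopA s (PySem.Chars.lower s) (pvPairs.map (fun p => (' ' :: p.1, ' ' :: p.2)))
        = Option.map (fun pr => (rest.reverse ++ [' ']) ++ pr.2)
            (List.find? (fun p => p.1 == PySem.Chars.lower T.reverse) pvPairs) := by
      conv_lhs => rw [hsdec]
      exact pvLoopEqFind rest.reverse T.reverse hlastS pvPairs (by decide)
    rw [hA]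
    by_cases hc : PySem.Set.contains pvSuffixSet (PySem.Chars.lower T.reverse) = true
    · -- the last token is a known suffix
      obtain ⟨pr, hprm, hpr1⟩ := (pvContainsIff _).mp hc
      have hsome : (List.find? (fun p => p.1 == PySem.Chars.lower T.reverse) pvPairs).isSome := by
        rw [List.find?_isSome]
        exact ⟨pr, hprm, by simp [hpr1]⟩
      obtain ⟨q, hq⟩ := Option.isSome_iff_exists.mp hsome
      have hq1 : q.1 = PySem.Chars.lower T.reverse := by
        have := List.find?_some hq
        simpa using this
      have hqm : q ∈ pvPairs := List.mem_of_find?_eq_some hq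
      have hall : ∀ p ∈ pvPairs, p.2 = pvCapitalize p.1 := by decide
      rw [hq, Option.map_some]
      simp only [ne_eq, reduceCtorEq, not_false_eq_true, true_and, hc, if_pos]
      rw [hall q hqm, hq1]

    · -- not a suffix: both fall through to the title-case branch
      have hnone : List.find? (fun p => p.1 == PySem.Chars.lower T.reverse) pvPairs = none := by
        rw [List.find?_eq_none]
        intro p hp
        simp only [beq_iff_eq]
        intro he
        exact hc ((pvContainsIff _).mpr ⟨p, hp, he⟩)
      rw [hnone, Option.map_none]
      have hcond : ¬ ((([' '] : List Char) ≠ []) ∧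
          PySem.Set.contains pvSuffixSet (PySem.Chars.lower T.reverse) = true) := by
        intro h; exact hc h.2
      simp only [hcond, if_false]
      by_cases hlow : s = PySem.Chars.lower s
      · rw [if_pos hlow, if_neg (not_not_intro hlow)]
      · rw [if_neg hlow, if_pos hlow]
  · -- no space in s at all
    have hnoslow : ' ' ∉ PySem.Chars.lower s := fun h => hsp (pvMemLower h)
    rw [pvLoopNone s _ hnoslow]
    have htw : s.reverse.takeWhile (fun c => c != ' ') = s.reverse := by
      rw [List.takeWhile_eq_self_iff]
      intro c hcm
      have : c ∈ s := List.mem_reverse.mp hcm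
      simp only [bne_iff_ne, ne_eq]
      intro he
      exact hsp (he ▸ this)
    have hrp : pvRpartitionSpace s = ([], [], s) := by
      rw [pvRpartition_eq s, htw, if_pos rfl]
    rw [hrp]
    simp only [ne_eq, not_true_eq_false, false_and, if_false]
    by_cases hlow : s = PySem.Chars.lower s
    · rw [if_pos hlow, if_neg (not_not_intro hlow)]
    · rw [if_neg hlow, if_pos hlow]

lemma pvFmt_eq (street : List Char) : pvFmtA street = pvFmtB street := by
  unfold pvFmtA pvFmtB
  by_cases hnil : PySem.Chars.strip (if street = [] then [] else street) = []
  · simp [hnil]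
  · rw [if_neg hnil, if_neg hnil, pvReplA_items]
    have := pvMain (PySem.Chars.join [' ']
      ((PySem.Chars.split₀ (PySem.Chars.strip (if street = [] then [] else street))).map pvFixWord))
      (PySem.Chars.strip (if street = [] then [] else street))
    simpa only [pvFixWord] using this

-- ===== VERDICT (by name: the statement is the Claim_ definition above) =====
theorem format_street_spec : Claim_equal_format_street := by
  intro street _
  unfold Spec_format_street format_street format_street_alt
  rw [pvFmt_eq]
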